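-- pv_equiv track=rewrite | github.com/Viraj97-SL/AI-News-Analyzer | app/core/security.py | sanitize_for_display
-- ===== SOURCE A (Python) =====
-- def sanitize_for_display(text: str) -> str:
--     """Strip potential prompt injection patterns and sensitive markers from output."""
--     dangerous_patterns = [
--         "SYSTEM:", "ASSISTANT:", "USER:", "```system",
--         "<|im_start|>", "<|im_end|>", "<<SYS>>", "<</SYS>>",
--     ]
--     sanitized = text
--     for pattern in dangerous_patterns:
--         sanitized = sanitized.replace(pattern, "[REDACTED]")
--     return sanitized
-- ===== SOURCE B (Python) =====
-- def sanitize_for_display(text: str) -> str: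
--     """Strip potential prompt injection patterns and sensitive markers from output.
--
--     Single left-to-right scan: at each position try all eight markers at once,
--     instead of eight sequential full-string replace passes.
--     """
--     dangerous_patterns = [
--         "SYSTEM:", "ASSISTANT:", "USER:", "```system",
--         "<|im_start|>", "<|im_end|>", "<<SYS>>", "<</SYS>>",
--     ]
--     out = []
--     i = 0
--     n = len(text)
--     while i < n:
--         for pattern in dangerous_patterns:
--             if text.startswith(pattern, i):
--                 out.append("[REDACTED]")
--                 i += len(pattern)
--                 break
--         else:
--             out.append(text[i])
--             i += 1
--     return "".join(out)
-- ===== Notes on version B (the rewrite author's own statement) =====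
-- stated objective: alternative
-- what changed: One left-to-right scan that tries all eight markers at each position and emits output incrementally, instead of eight sequential full-string str.replace passes.
import Mathlib
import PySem

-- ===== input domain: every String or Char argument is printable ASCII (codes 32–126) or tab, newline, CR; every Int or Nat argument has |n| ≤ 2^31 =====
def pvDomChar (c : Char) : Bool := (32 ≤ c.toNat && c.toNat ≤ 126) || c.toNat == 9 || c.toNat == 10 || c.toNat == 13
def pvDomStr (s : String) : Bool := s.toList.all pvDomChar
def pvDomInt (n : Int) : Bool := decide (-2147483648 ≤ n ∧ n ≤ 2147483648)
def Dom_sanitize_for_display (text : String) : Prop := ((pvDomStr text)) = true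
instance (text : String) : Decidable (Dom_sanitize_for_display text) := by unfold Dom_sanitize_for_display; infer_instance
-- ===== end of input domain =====

-- B replaces A's eight sequential full-string replace passes by one left-to-right scan
-- that tries all eight markers at each position (alternative algorithm, same result).

-- ===== PORT A =====
def sanitize_for_display (text : String) : String :=
  List.foldl (fun sanitized pattern => PySem.Str.replace sanitized pattern "[REDACTED]")
    text
    ["SYSTEM:", "ASSISTANT:", "USER:", "```system",
     "<|im_start|>", "<|im_end|>", "<<SYS>>", "<</SYS>>"]

-- ===== PORT B =====
-- Source B's pattern list and its "[REDACTED]" marker, as char lists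
def pvPats : List (List Char) :=
  ["SYSTEM:".toList, "ASSISTANT:".toList, "USER:".toList, "```system".toList,
   "<|im_start|>".toList, "<|im_end|>".toList, "<<SYS>>".toList, "<</SYS>>".toList]

def pvRED : List Char := "[REDACTED]".toList

-- Source B's inner for/else: first pattern matching at the current position (text.startswith(pattern, i))
def pvFindPat (pats : List (List Char)) (l : List Char) : Option (List Char) :=
  pats.find? (fun p => PySem.Chars.startswith l p)

-- Source B's while loop: the remaining suffix of the text is the recursion argument
def pvScan (l : List Char) : List Char :=
  match l with
  | [] => []
  | c :: t =>
    match pvFindPat pvPats (c :: t) with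
    | some p => pvRED ++ pvScan (t.drop (p.length - 1))
    | none => c :: pvScan t
termination_by l.length
decreasing_by
  · simp only [List.length_drop, List.length_cons]; omega
  · simp

def sanitize_for_display_alt (text : String) : String :=
  String.ofList (pvScan text.toList)

-- ===== PRECONDITION & SPEC =====
def Spec_sanitize_for_display (text : String) (out : String) : Prop := out = sanitize_for_display_alt text
instance (text : String) (out : String) : Decidable (Spec_sanitize_for_display text out) := by unfold Spec_sanitize_for_display; infer_instance

-- ===== CLAIM (what is proved, stated in full; the proofs are below) =====
def Claim_equal_sanitize_for_display : Prop := ∀ (text : String), Dom_sanitize_for_display text → Spec_sanitize_for_display text (sanitize_for_display text)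

-- ===== LEMMAS AND PROOFS =====

-- fuel-free form of PySem.Chars.replace (for a nonempty pattern)
def pvRepl (old new : List Char) : List Char → List Char
  | [] => []
  | c :: t =>
    if old.isPrefixOf (c :: t) then new ++ pvRepl old new (t.drop (old.length - 1))
    else c :: pvRepl old new t
termination_by l => l.length
decreasing_by
  · simp only [List.length_drop, List.length_cons]; omega
  · simp

theorem pvRepl_nil (old new : List Char) : pvRepl old new [] = [] := by rw [pvRepl]

theorem pvGo_eq (old new : List Char) (h : old ≠ []) :
    ∀ (fuel : Nat) (l acc : List Char), l.length ≤ fuel →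
      PySem.Chars.replace.go old new fuel l acc = acc.reverse ++ pvRepl old new l := by
  intro fuel
  induction fuel with
  | zero =>
    intro l acc hl
    have : l = [] := List.eq_nil_of_length_eq_zero (Nat.le_zero.mp hl)
    subst this
    simp [PySem.Chars.replace.go, pvRepl_nil]
  | succ fuel ih =>
    intro l acc hl
    cases l with
    | nil => simp [PySem.Chars.replace.go, pvRepl_nil]
    | cons c t =>
      obtain ⟨o, os, rfl⟩ : ∃ o os, old = o :: os := by
        cases old with | nil => exact absurd rfl h | cons o os => exact ⟨o, os, rfl⟩
      rw [PySem.Chars.replace.go]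
      split
      · rw [pvRepl]
        rw [if_pos (by assumption)]
        have hlen : (List.drop (o :: os).length (c :: t)).length ≤ fuel := by
          simp only [List.length_drop, List.length_cons]
          simp only [List.length_cons] at hl
          omega
        rw [ih _ _ hlen]
        simp [List.drop_succ_cons]
      · rw [pvRepl]
        rw [if_neg (by assumption)]
        have : t.length ≤ fuel := by simp only [List.length_cons] at hl; omega
        rw [ih _ _ this]
        simp

theorem pvReplace_eq (old new s : List Char) (h : old ≠ []) :
    PySem.Chars.replace s old new = pvRepl old new s := by
  rw [PySem.Chars.replace]
  rw [if_neg (by simpa [List.isEmpty_iff] using h)]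
  simpa using pvGo_eq old new h s.length s [] le_rfl

-- a prefix not containing '[' of the replaced string is a prefix of the original
theorem pvAgree (old : List Char) : ∀ (t p : List Char), '[' ∉ p →
    p <+: pvRepl old pvRED t → p <+: t := by
  intro t
  induction t using pvRepl.induct old with
  | case1 => intro p _ hp; simpa [pvRepl_nil] using hp
  | case2 c t hpre ih =>
    intro p hb hp
    rw [pvRepl, if_pos hpre] at hp
    cases p with
    | nil => exact List.nil_prefix
    | cons a p' =>
      exfalso
      have : a = '[' := by
        obtain ⟨r, hr⟩ := hp
        have h2 := congrArg List.head? hr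
        simpa [pvRED] using h2
      exact hb (this ▸ List.mem_cons_self ..)
  | case3 c t hpre ih =>
    intro p hb hp
    rw [pvRepl, if_neg hpre] at hp
    cases p with
    | nil => exact List.nil_prefix
    | cons a p' =>
      obtain ⟨rfl, hp'⟩ := by exact List.cons_prefix_cons.mp hp
      exact List.cons_prefix_cons.mpr ⟨rfl, ih p' (fun hm => hb (List.mem_cons_of_mem _ hm)) hp'⟩

-- a replace pass walks through a block it cannot match into
theorem pvRepl_append (old new : List Char) :
    ∀ (a u : List Char),
      (∀ k < a.length, ((old.take (a.length - k)).isPrefixOf (a.drop k)) = false) →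
      pvRepl old new (a ++ u) = a ++ pvRepl old new u := by
  intro a
  induction a with
  | nil => intro u _; simp
  | cons c a' ih =>
    intro u hc
    have hnp : ¬ old.isPrefixOf (c :: (a' ++ u)) := by
      intro hpre
      have h0 := hc 0 (by simp)
      rw [List.isPrefixOf_iff_prefix] at hpre
      obtain ⟨r, hr⟩ := hpre
      rw [← List.cons_append] at hr
      have htake : (old.take (c :: a').length).isPrefixOf (c :: a') = true := by
        rw [List.isPrefixOf_iff_prefix]
        have heq := congrArg (List.take (c :: a').length) hr
        simp only [List.take_append, List.take_length, Nat.sub_self, List.take_zero,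
          List.append_nil] at heq
        exact ⟨_, heq⟩
      simp only [Nat.sub_zero, List.drop_zero] at h0
      rw [h0] at htake
      exact Bool.false_ne_true htake
    rw [List.cons_append, pvRepl, if_neg hnp]
    rw [ih u (fun k hk => by
      have := hc (k+1) (by simpa using Nat.succ_lt_succ hk)
      simpa using this)]
    simp

-- a replace pass fires on its own pattern at the head
theorem pvRepl_head (old new u : List Char) (h : old ≠ []) :
    pvRepl old new (old ++ u) = new ++ pvRepl old new u := by
  obtain ⟨o, os, rfl⟩ : ∃ o os, old = o :: os := by
    cases old with | nil => exact absurd rfl h | cons o os => exact ⟨o, os, rfl⟩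
  rw [List.cons_append, pvRepl, if_pos (by rw [List.isPrefixOf_iff_prefix]; exact ⟨u, by simp⟩)]
  simp

-- the chain of replace passes that A performs, on char lists
def pvChain (ps : List (List Char)) (l : List Char) : List Char :=
  ps.foldl (fun l p => pvRepl p pvRED l) l

theorem pvChain_nil (ps : List (List Char)) : pvChain ps [] = [] := by
  induction ps with
  | nil => rfl
  | cons q ps ih => simpa [pvChain, pvRepl_nil] using ih

theorem pvChain_cons (ps : List (List Char)) :
    ∀ (t : List Char) (c : Char), (∀ p ∈ ps, '[' ∉ p) → (∀ p ∈ ps, ¬ p <+: (c :: t)) →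
      pvChain ps (c :: t) = c :: pvChain ps t := by
  induction ps with
  | nil => intro t c _ _; rfl
  | cons q ps ih =>
    intro t c hb hm
    have hq : ¬ q.isPrefixOf (c :: t) := by
      rw [List.isPrefixOf_iff_prefix]
      exact hm q (List.mem_cons_self ..)
    have step : pvRepl q pvRED (c :: t) = c :: pvRepl q pvRED t := by
      rw [pvRepl, if_neg hq]
    show pvChain ps (pvRepl q pvRED (c :: t)) = c :: pvChain ps (pvRepl q pvRED t)
    rw [step]
    exact ih (pvRepl q pvRED t) c
      (fun p hp => hb p (List.mem_cons_of_mem _ hp))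
      (fun p hp hpre => by
        rcases p with _ | ⟨a, p'⟩
        · exact hm [] (List.mem_cons_of_mem _ hp) List.nil_prefix
        · obtain ⟨rfl, hp'⟩ := List.cons_prefix_cons.mp hpre
          have : p' <+: t := pvAgree q t p'
            (fun hmem => hb _ (List.mem_cons_of_mem _ hp) (List.mem_cons_of_mem _ hmem)) hp'
          exact hm _ (List.mem_cons_of_mem _ hp) (List.cons_prefix_cons.mpr ⟨rfl, this⟩))

theorem pvChain_shift (ps : List (List Char)) (a : List Char)
    (hc : ∀ q ∈ ps, ∀ k < a.length, ((q.take (a.length - k)).isPrefixOf (a.drop k)) = false) :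
    ∀ (u : List Char), pvChain ps (a ++ u) = a ++ pvChain ps u := by
  induction ps with
  | nil => intro u; rfl
  | cons q ps ih =>
    intro u
    show pvChain ps (pvRepl q pvRED (a ++ u)) = a ++ pvChain ps (pvRepl q pvRED u)
    rw [pvRepl_append q pvRED a u (hc q (List.mem_cons_self ..))]
    exact ih (fun p hp => hc p (List.mem_cons_of_mem _ hp)) (pvRepl q pvRED u)

theorem pvChain_match (pre post : List (List Char)) (p : List Char) (hp : p ≠ [])
    (hpre : ∀ q ∈ pre, ∀ k < p.length, ((q.take (p.length - k)).isPrefixOf (p.drop k)) = false)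
    (hpost : ∀ q ∈ post, ∀ k < pvRED.length, ((q.take (pvRED.length - k)).isPrefixOf (pvRED.drop k)) = false)
    (u : List Char) :
    pvChain (pre ++ p :: post) (p ++ u) = pvRED ++ pvChain (pre ++ p :: post) u := by
  simp only [pvChain, List.foldl_append, List.foldl_cons]
  show pvChain post (pvRepl p pvRED (pvChain pre (p ++ u)))
      = pvRED ++ pvChain post (pvRepl p pvRED (pvChain pre u))
  rw [pvChain_shift pre p hpre u, pvRepl_head p pvRED (pvChain pre u) hp]
  exact pvChain_shift post pvRED hpost (pvRepl p pvRED (pvChain pre u))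

-- concrete facts about the fixed pattern list and marker (checked by decide):
-- nonempty, no '[' inside, pairwise distinct, and no pattern can start inside
-- another pattern or inside the "[REDACTED]" marker
theorem pvPats_ne_nil : ∀ p ∈ pvPats, p ≠ [] := by decide
theorem pvPats_no_bracket : ∀ p ∈ pvPats, '[' ∉ p := by decide
theorem pvPats_nodup : pvPats.Nodup := by decide
theorem pvPats_shift : ∀ p ∈ pvPats, ∀ q ∈ pvPats, p ≠ q →
    ∀ k < p.length, ((q.take (p.length - k)).isPrefixOf (p.drop k)) = false := by decide
theorem pvRED_shift : ∀ q ∈ pvPats, ∀ k < pvRED.length,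
    ((q.take (pvRED.length - k)).isPrefixOf (pvRED.drop k)) = false := by decide

theorem pvChain_eq_scan : ∀ (n : Nat) (s : List Char), s.length ≤ n →
    pvChain pvPats s = pvScan s := by
  intro n
  induction n with
  | zero =>
    intro s hs
    have : s = [] := List.eq_nil_of_length_eq_zero (Nat.le_zero.mp hs)
    subst this
    rw [pvChain_nil, pvScan]
  | succ n ih =>
    intro s hs
    cases s with
    | nil => rw [pvChain_nil, pvScan]
    | cons c t =>
      cases hfind : pvFindPat pvPats (c :: t) with
      | none =>
        have hnm : ∀ p ∈ pvPats, ¬ p <+: (c :: t) := by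
          intro p hpmem hpre
          have := List.find?_eq_none.mp hfind p hpmem
          exact this ((PySem.Chars.startswith_iff _ _).mpr hpre)
        rw [pvChain_cons pvPats t c pvPats_no_bracket hnm,
          ih t (by simpa using Nat.lt_succ_iff.mp (by simpa using hs)), pvScan, hfind]
      | some p =>
        have hpmem : p ∈ pvPats := List.mem_of_find?_eq_some hfind
        have hpre : p <+: (c :: t) :=
          (PySem.Chars.startswith_iff _ _).mp (List.find?_some hfind)
        obtain ⟨u, hu⟩ := hpre
        obtain ⟨prel, postl, hsplit⟩ := List.append_of_mem hpmem
        have hnodup := pvPats_nodup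
        rw [hsplit] at hnodup
        have hnotpre : p ∉ prel := by
          intro hmem
          exact (List.disjoint_of_nodup_append hnodup) hmem (List.mem_cons_self ..)
        have hne : p ≠ [] := pvPats_ne_nil p hpmem
        have hmatch := pvChain_match prel postl p hne
          (fun q hq => pvPats_shift p hpmem q (by rw [hsplit]; exact List.mem_append_left _ hq)
            (fun h => hnotpre (h ▸ hq)))
          (fun q hq => pvRED_shift q (by rw [hsplit]; exact List.mem_append_right _ (List.mem_cons_of_mem _ hq)))
          u
        rw [← hsplit] at hmatch
        obtain ⟨a, p', rfl⟩ : ∃ a p', p = a :: p' := by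
          cases p with | nil => exact absurd rfl hne | cons a p' => exact ⟨a, p', rfl⟩
        have hc : c = a := by cases hu; rfl
        have ht : t = p' ++ u := by cases hu; rfl
        subst hc; subst ht
        rw [← List.cons_append, hmatch]
        rw [pvScan.eq_def]
        show _ = match pvFindPat pvPats (c :: (p' ++ u)) with
          | some p => pvRED ++ pvScan (List.drop (p.length - 1) (p' ++ u))
          | none => c :: pvScan (p' ++ u)
        rw [hfind]
        show pvRED ++ pvChain pvPats u = pvRED ++ pvScan (List.drop ((c :: p').length - 1) (p' ++ u))
        have hdrop : List.drop ((c :: p').length - 1) (p' ++ u) = u := by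
          simp
        rw [hdrop]
        have hulen : u.length ≤ n := by
          simp only [List.length_cons, List.length_append] at hs
          omega
        rw [ih u hulen]

theorem pvFold_toList : ∀ (ps : List String) (s : String), (∀ p ∈ ps, p.toList ≠ []) →
    (List.foldl (fun s p => PySem.Str.replace s p "[REDACTED]") s ps).toList
      = List.foldl (fun l p => pvRepl p pvRED l) s.toList (ps.map String.toList) := by
  intro ps
  induction ps with
  | nil => intro s _; rfl
  | cons q ps ih =>
    intro s hne
    rw [List.foldl_cons, List.map_cons, List.foldl_cons,
      ih _ (fun p hp => hne p (List.mem_cons_of_mem _ hp)),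
      PySem.Str.toList_replace, pvReplace_eq _ _ _ (hne q (List.mem_cons_self ..))]
    rfl

-- ===== VERDICT (by name: the statement is the Claim_ definition above) =====
theorem sanitize_for_display_spec : Claim_equal_sanitize_for_display := by
  intro text _
  show sanitize_for_display text = sanitize_for_display_alt text
  rw [← String.toList_inj]
  rw [sanitize_for_display, sanitize_for_display_alt,
    pvFold_toList _ text (by decide)]
  have hmap : (["SYSTEM:", "ASSISTANT:", "USER:", "```system",
     "<|im_start|>", "<|im_end|>", "<<SYS>>", "<</SYS>>"] : List String).map String.toList = pvPats := rfl
  rw [hmap]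
  have hch := pvChain_eq_scan text.toList.length text.toList le_rfl
  rw [pvChain] at hch
  rw [hch]
  simp
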